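-- pv_equiv track=rewrite | github.com/Amedar-Asterisk/U-Statistics-python | src/U_stats/utils.py | standardize_indexes
-- ===== SOURCE A (Python) =====
-- from typing import List, Tuple, Union, Callable, Optional, Any, Dict, Set, Hashable
--
-- def standardize_indexes(lst: list) -> List[List[int]]:
--     """
--     Standardize the index list to continuous integer indexes.
--
--     Args:
--         lst (list): List of index pairs. Each pair is a list of some integers.
--
--     Returns:
--         List[List[int]]: Standardized index list.
--     """
--     num_to_index = {}
--     standardized_lst = []
--     current_index = 0
--     for t in lst:
--         standardized_pair = []
--         for num in t:
--             if num not in num_to_index: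
--                 num_to_index[num] = current_index
--                 current_index += 1
--             standardized_pair.append(num_to_index[num])
--         standardized_lst.append(standardized_pair)
--
--     return standardized_lst
-- ===== SOURCE B (Python) =====
-- def standardize_indexes(lst: list):
--     # Closed-form per element: the standardized index of a value n is the number
--     # of distinct values occurring strictly before n's first occurrence in the
--     # flattened input -- no mapping table is ever built.
--     flat = [n for t in lst for n in t]
--     return [[len(set(flat[:flat.index(n)])) for n in t] for t in lst]
-- ===== Notes on version B (the rewrite author's own statement) =====
-- stated objective: alternative
-- what changed: B builds no index table at all: it computes each element's standardized index directly by a closed-form characterisation -- the number of distinct values before the element's first occurrence in the flattened list (len(set(flat[:flat.index(n)]))) -- instead of A's stateful nested loop threading a dict and a running counter.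
import Mathlib
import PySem

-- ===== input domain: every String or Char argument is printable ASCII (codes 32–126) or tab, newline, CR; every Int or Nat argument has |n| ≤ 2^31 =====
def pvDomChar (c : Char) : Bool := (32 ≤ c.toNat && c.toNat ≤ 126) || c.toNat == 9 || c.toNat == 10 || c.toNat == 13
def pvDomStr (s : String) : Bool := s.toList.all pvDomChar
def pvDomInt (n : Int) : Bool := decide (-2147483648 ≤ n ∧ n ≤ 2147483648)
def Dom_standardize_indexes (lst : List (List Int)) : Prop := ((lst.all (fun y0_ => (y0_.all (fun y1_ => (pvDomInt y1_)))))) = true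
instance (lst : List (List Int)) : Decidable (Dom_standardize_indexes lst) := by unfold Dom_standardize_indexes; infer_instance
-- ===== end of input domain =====

-- B builds no index table: each element's standardized index is computed directly as the number
-- of distinct values before its first occurrence in the flattened input (alternative algorithm).


-- ===== PORT A =====
-- State: (num_to_index, standardized_lst / standardized_pair, current_index), exactly as A threads them.
def standardize_indexes (lst : List (List Int)) : List (List Int) :=
  let st := lst.foldl (fun (st : PySem.Dict Int Int × List (List Int) × Int) t =>
      let inner := t.foldl (fun (s : PySem.Dict Int Int × List Int × Int) num =>
          if s.1.contains num then
            (s.1, s.2.1 ++ [s.1.getD num 0], s.2.2)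
          else
            let d' := s.1.insert num s.2.2
            (d', s.2.1 ++ [d'.getD num 0], s.2.2 + 1))
        (st.1, ([] : List Int), st.2.2)
      (inner.1, st.2.1 ++ [inner.2.1], inner.2.2))
    (PySem.Dict.empty, ([] : List (List Int)), (0 : Int))
  st.2.1

-- ===== PORT B =====
-- flat[:flat.index(n)] with n always ∈ flat: index? is some there, so .getD 0 is exact;
-- the nonnegative slice bound makes PySem.List.slice exact for flat[:i].
def standardize_indexes_alt (lst : List (List Int)) : List (List Int) :=
  let flat := lst.flatMap id
  lst.map (fun t => t.map (fun n =>
    ((PySem.Set.ofList (PySem.List.slice flat none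
        (some (((PySem.List.index? flat n).getD 0 : Nat) : Int)))).length : Int)))

-- ===== PRECONDITION & SPEC =====
def Spec_standardize_indexes (lst : List (List Int)) (out : List (List Int)) : Prop := out = standardize_indexes_alt lst
instance (lst : List (List Int)) (out : List (List Int)) : Decidable (Spec_standardize_indexes lst out) := by unfold Spec_standardize_indexes; infer_instance

-- ===== CLAIM (what is proved, stated in full; the proofs are below) =====
def Claim_equal_standardize_indexes : Prop := ∀ (lst : List (List Int)), Dom_standardize_indexes lst → Spec_standardize_indexes lst (standardize_indexes lst)

-- ===== LEMMAS AND PROOFS =====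

-- A's dict, built over a flat list of numbers with current_index = size (helper for the proofs only).
def pvBuild (d : PySem.Dict Int Int) (nums : List Int) : PySem.Dict Int Int :=
  nums.foldl (fun d num => d.setdefault num (d.size : Int)) d

theorem pvBuild_nil (d : PySem.Dict Int Int) : pvBuild d [] = d := rfl

theorem pvBuild_cons (d : PySem.Dict Int Int) (n : Int) (ns : List Int) :
    pvBuild d (n :: ns) = pvBuild (d.setdefault n (d.size : Int)) ns := rfl

theorem pvBuild_append (d : PySem.Dict Int Int) (xs ys : List Int) :
    pvBuild d (xs ++ ys) = pvBuild (pvBuild d xs) ys := by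
  simp [pvBuild, List.foldl_append]

-- Once a key is bound, building further never changes its binding.
theorem pvBuild_get?_mono (nums : List Int) :
    ∀ (d : PySem.Dict Int Int) (k : Int), (d.get? k).isSome →
      (pvBuild d nums).get? k = d.get? k := by
  induction nums with
  | nil => intro d k _; rfl
  | cons n ns ih =>
    intro d k hk
    rw [pvBuild_cons]
    by_cases hc : d.contains n
    · rw [PySem.Dict.setdefault_of_contains d _ hc]; exact ih d k hk
    · rw [PySem.Dict.setdefault_of_not_contains d _ (by simpa using hc)]
      have hne : k ≠ n := by
        intro h; subst h
        rw [PySem.Dict.contains_eq_isSome_get?] at hc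
        simp [hk] at hc
      rw [ih _ k (by rw [PySem.Dict.get?_insert_of_ne d _ hne]; exact hk),
          PySem.Dict.get?_insert_of_ne d _ hne]

theorem pvBuild_getD_mono (nums : List Int) (d : PySem.Dict Int Int) (k : Int)
    (hk : (d.get? k).isSome) : (pvBuild d nums).getD k 0 = d.getD k 0 := by
  rw [PySem.Dict.getD_eq_get?_getD, PySem.Dict.getD_eq_get?_getD, pvBuild_get?_mono nums d k hk]

-- Every element of nums ends up bound.
theorem pvBuild_mem_isSome (nums : List Int) :
    ∀ (d : PySem.Dict Int Int) (k : Int), k ∈ nums →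
      ((pvBuild d nums).get? k).isSome := by
  induction nums with
  | nil => intro d k h; cases h
  | cons n ns ih =>
    intro d k hk
    rw [pvBuild_cons]
    rcases List.mem_cons.mp hk with h | h
    · subst h
      have : ((d.setdefault k (d.size : Int)).get? k).isSome := by
        rw [PySem.Dict.get?_setdefault_self]; rfl
      rw [pvBuild_get?_mono ns _ k this]; exact this
    · exact ih _ k h

-- A's inner loop over one pair, related to pvBuild (current_index = d.size is the invariant).
theorem pvInner_eq (t : List Int) :
    ∀ (d : PySem.Dict Int Int) (pair : List Int) (ci : Int), ci = (d.size : Int) →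
      t.foldl (fun (s : PySem.Dict Int Int × List Int × Int) num =>
          if s.1.contains num then
            (s.1, s.2.1 ++ [s.1.getD num 0], s.2.2)
          else
            let d' := s.1.insert num s.2.2
            (d', s.2.1 ++ [d'.getD num 0], s.2.2 + 1))
        (d, pair, ci)
      = (pvBuild d t, pair ++ t.map (fun n => (pvBuild d t).getD n 0), ((pvBuild d t).size : Int)) := by
  induction t with
  | nil => intro d pair ci hci; simp [pvBuild_nil, hci]
  | cons n ns ih =>
    intro d pair ci hci
    subst hci
    rw [List.foldl_cons, List.map_cons, pvBuild_cons]
    by_cases hc : d.contains n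
    · rw [PySem.Dict.setdefault_of_contains d _ hc]
      simp only [hc, if_true]
      have hs : (d.get? n).isSome := by
        rw [PySem.Dict.contains_eq_isSome_get?] at hc; exact hc
      rw [ih d (pair ++ [d.getD n 0]) _ rfl, pvBuild_getD_mono ns d n hs, List.append_assoc]
      rfl
    · rw [PySem.Dict.setdefault_of_not_contains d _ (by simpa using hc)]
      simp only [hc, Bool.false_eq_true, if_false]
      set d' := d.insert n (d.size : Int) with hd'
      have hsz : (d'.size : Int) = (d.size : Int) + 1 := by
        rw [hd', PySem.Dict.size_insert]
        simp [hc]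
      have hs' : (d'.get? n).isSome := by
        rw [hd', PySem.Dict.get?_insert_self]; rfl
      rw [ih d' (pair ++ [d'.getD n 0]) _ hsz.symm, pvBuild_getD_mono ns d' n hs',
          List.append_assoc]
      rfl

-- A's outer loop, related to pvBuild over the flattened list.
theorem pvOuter_eq (lst : List (List Int)) :
    ∀ (d : PySem.Dict Int Int) (acc : List (List Int)) (ci : Int), ci = (d.size : Int) →
      lst.foldl (fun (st : PySem.Dict Int Int × List (List Int) × Int) t =>
          let inner := t.foldl (fun (s : PySem.Dict Int Int × List Int × Int) num =>
              if s.1.contains num then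
                (s.1, s.2.1 ++ [s.1.getD num 0], s.2.2)
              else
                let d' := s.1.insert num s.2.2
                (d', s.2.1 ++ [d'.getD num 0], s.2.2 + 1))
            (st.1, ([] : List Int), st.2.2)
          (inner.1, st.2.1 ++ [inner.2.1], inner.2.2))
        (d, acc, ci)
      = (pvBuild d (lst.flatMap id),
         acc ++ lst.map (fun t => t.map (fun n => (pvBuild d (lst.flatMap id)).getD n 0)),
         ((pvBuild d (lst.flatMap id)).size : Int)) := by
  induction lst with
  | nil => intro d acc ci hci; simp [pvBuild_nil, hci]
  | cons t ts ih =>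
    intro d acc ci hci
    subst hci
    rw [List.foldl_cons]
    have hflat : (t :: ts).flatMap id = t ++ ts.flatMap id := by simp
    simp only [pvInner_eq t d [] _ rfl]
    rw [List.nil_append]
    rw [ih (pvBuild d t) (acc ++ [t.map (fun n => (pvBuild d t).getD n 0)]) _ rfl]
    rw [hflat, pvBuild_append]
    have hmap : t.map (fun n => (pvBuild d t).getD n 0)
        = t.map (fun n => (pvBuild (pvBuild d t) (ts.flatMap id)).getD n 0) := by
      apply List.map_congr_left
      intro n hn
      rw [pvBuild_getD_mono _ _ n (pvBuild_mem_isSome t d n hn)]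
    rw [List.map_cons, List.append_assoc, hmap]
    rfl

-- An element strictly before the first occurrence of a is not a.
theorem pv_ne_of_lt_idxOf (l : List Int) (a : Int) (j : Nat) (hj : j < List.idxOf a l)
    (hl : j < l.length) : l[j] ≠ a := by
  intro he
  have := List.not_of_lt_findIdx (p := (· == a)) (xs := l) (by simpa [List.idxOf] using hj)
  simp only [beq_eq_false_iff_ne, ne_eq] at this
  exact this he

-- Characterisation of A's dict over a flat list: size = number of distinct values,
-- and each bound key's value = number of distinct values before its first occurrence.
theorem pvBuild_char (p : List Int) :
    (pvBuild PySem.Dict.empty p).size = (PySem.Set.ofList p).length ∧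
    ∀ n ∈ p, (pvBuild PySem.Dict.empty p).get? n
      = some (((PySem.Set.ofList (p.take (List.idxOf n p))).length : Int)) := by
  induction p using List.reverseRecOn with
  | nil => exact ⟨rfl, by intro n h; cases h⟩
  | append_singleton p m ih =>
    obtain ⟨hsz, hget⟩ := ih
    have hb : pvBuild PySem.Dict.empty (p ++ [m])
        = (pvBuild PySem.Dict.empty p).setdefault m ((pvBuild PySem.Dict.empty p).size : Int) := by
      rw [pvBuild_append]; rfl
    have hcont : (pvBuild PySem.Dict.empty p).contains m = decide (m ∈ p) := by
      rw [PySem.Dict.contains_eq_isSome_get?]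
      by_cases hm : m ∈ p
      · simp [hm, (hget m hm)]
      · simp only [hm, decide_false]
        by_contra hsome
        have : ((pvBuild PySem.Dict.empty p).get? m).isSome := by
          cases h : (pvBuild PySem.Dict.empty p).get? m with
          | none => exact absurd (by simp [h]) hsome
          | some v => simp
        -- a key bound by pvBuild from empty must be in p
        exfalso
        revert this
        clear hsz hget hb hsome
        -- show: m ∉ p → key not bound; by a small generic fact
        have : ∀ (q : List Int) (d : PySem.Dict Int Int) (k : Int), k ∉ q →
            d.contains k = false → ((pvBuild d q).get? k).isSome = false := by
          intro q
          induction q with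
          | nil =>
            intro d k _ hdk
            rw [pvBuild_nil, PySem.Dict.contains_eq_isSome_get?] at *
            exact hdk
          | cons x xs ihq =>
            intro d k hk hdk
            rw [pvBuild_cons]
            have hkx : k ≠ x := fun h => hk (h ▸ List.mem_cons_self ..)
            apply ihq _ k (fun h => hk (List.mem_cons_of_mem _ h))
            rw [PySem.Dict.contains_eq_isSome_get?, PySem.Dict.get?_setdefault_of_ne _ _ hkx,
              ← PySem.Dict.contains_eq_isSome_get?]
            exact hdk
        intro hs
        rw [this p PySem.Dict.empty m hm (by simp [pysem])] at hs
        exact Bool.false_ne_true hs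
    by_cases hm : m ∈ p
    · rw [hb, PySem.Dict.setdefault_of_contains _ _ (by simp [hcont, hm])]
      constructor
      · rw [hsz, PySem.Set.ofList_append_singleton]
        simp [PySem.Set.add, PySem.Set.mem_ofList, hm]
      · intro n hn
        have hnp : n ∈ p := by
          rcases List.mem_append.mp hn with h | h
          · exact h
          · simpa using (List.mem_singleton.mp h) ▸ hm
        have hidx : List.idxOf n (p ++ [m]) = List.idxOf n p := List.idxOf_append_of_mem hnp
        rw [hidx, List.take_append_of_le_length List.idxOf_le_length]
        exact hget n hnp
    · rw [hb, PySem.Dict.setdefault_of_not_contains _ _ (by simp [hcont, hm])]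
      refine ⟨?_, ?_⟩
      · rw [PySem.Dict.size_insert, hcont]
        simp only [hm, decide_false, Bool.false_eq_true, if_false]
        rw [hsz, PySem.Set.ofList_append_singleton]
        simp [PySem.Set.add, PySem.Set.mem_ofList, hm]
      · intro x hx
        rcases eq_or_ne x m with hxm | hxm
        · subst hxm
          rw [PySem.Dict.get?_insert_self]
          have hidx : List.idxOf x (p ++ [x]) = p.length := by
            rw [List.idxOf_append]
            simp [hm, List.idxOf]
          rw [hidx, List.take_append_of_le_length (le_refl _), List.take_length, hsz]
        · have hxp : x ∈ p := by
            rcases List.mem_append.mp hx with h | h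
            · exact h
            · exact absurd (List.mem_singleton.mp h) hxm
          rw [PySem.Dict.get?_insert_of_ne _ _ hxm]
          have hidx : List.idxOf x (p ++ [m]) = List.idxOf x p := List.idxOf_append_of_mem hxp
          rw [hidx, List.take_append_of_le_length List.idxOf_le_length]
          exact hget x hxp

-- index? on a member is some idxOf.
theorem pv_index?_of_mem (l : List Int) (a : Int) (h : a ∈ l) :
    PySem.List.index? l a = some (List.idxOf a l) := by
  simp only [PySem.List.index?_eq_idxOf?, List.idxOf?_eq_some_iff]
  refine ⟨List.idxOf_lt_length_of_mem h, List.getElem_idxOf _, fun j hj => pv_ne_of_lt_idxOf l a j hj _⟩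

-- ===== VERDICT (by name: the statement is the Claim_ definition above) =====
theorem standardize_indexes_spec : Claim_equal_standardize_indexes := by
  intro lst _
  show standardize_indexes lst = standardize_indexes_alt lst
  unfold standardize_indexes standardize_indexes_alt
  rw [pvOuter_eq lst PySem.Dict.empty [] 0 rfl]
  simp only [List.nil_append]
  apply List.map_congr_left
  intro t ht
  apply List.map_congr_left
  intro n hn
  have hmem : n ∈ lst.flatMap id := List.mem_flatMap.mpr ⟨t, ht, hn⟩
  obtain ⟨hsz, hget⟩ := pvBuild_char (lst.flatMap id)
  rw [PySem.Dict.getD_eq_get?_getD, hget n hmem, pv_index?_of_mem _ n hmem]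
  simp only [Option.getD_some]
  rw [PySem.List.slice_to_natCast]
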